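-- pv_equiv track=rewrite | github.com/penguininthesnow/Week2Assign | Week2/work-4.py | func4
-- ===== SOURCE A (Python) =====
-- def func4(sp, stat, n):
--     candidates=[]
--
--     for i, (s, st) in enumerate(zip(sp, stat)):
--          if st == '0': # 只看可服務的車廂
--             candidates.append((i, s))
--     if not candidates:
--         return None
--
--     # 能完全容納乘客的車廂
--     enough=[(i, s) for i, s in candidates if s>= n]
--     if enough:
--         #   選座位數最小的那一個
--         idx= min(enough, key=lambda x: x[1])[0]
--     else:
--         #  選座位數最小的那一個(剛好夠)
--         idx = max(candidates, key=lambda x:x[1])[0]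
--
--     return idx
-- ===== SOURCE B (Python) =====
-- def func4(sp, stat, n):
--     best_fit = None   # (index, seats) of the smallest-seat serviceable car with seats >= n (first wins on ties)
--     best_any = None   # (index, seats) of the largest-seat serviceable car (first wins on ties)
--     for i, (s, st) in enumerate(zip(sp, stat)):
--         if st == '0':
--             if s >= n and (best_fit is None or s < best_fit[1]):
--                 best_fit = (i, s)
--             if best_any is None or s > best_any[1]:
--                 best_any = (i, s)
--     if best_fit is not None:
--         return best_fit[0]
--     if best_any is not None:
--         return best_any[0]
--     return None
-- ===== Notes on version B (the rewrite author's own statement) =====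
-- stated objective: alternative
-- what changed: Replaces A's candidate-list build plus 'enough' filter plus min/max passes over intermediate lists with a single pass over enumerate(zip(sp, stat)) that maintains two scalar trackers (best fitting car, largest car) with strict comparisons preserving first-occurrence tie-breaking.
import Mathlib
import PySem

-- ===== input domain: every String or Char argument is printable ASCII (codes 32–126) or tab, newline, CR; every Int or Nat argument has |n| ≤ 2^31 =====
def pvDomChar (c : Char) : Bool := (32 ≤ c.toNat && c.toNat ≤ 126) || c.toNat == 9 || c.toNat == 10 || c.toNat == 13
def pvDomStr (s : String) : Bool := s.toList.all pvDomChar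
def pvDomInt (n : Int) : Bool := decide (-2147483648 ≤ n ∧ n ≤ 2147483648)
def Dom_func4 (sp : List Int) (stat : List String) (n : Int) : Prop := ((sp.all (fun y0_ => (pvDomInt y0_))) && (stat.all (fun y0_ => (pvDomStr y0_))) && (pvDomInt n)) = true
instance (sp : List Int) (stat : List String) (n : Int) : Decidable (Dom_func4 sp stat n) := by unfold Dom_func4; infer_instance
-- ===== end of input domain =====

-- B replaces A's three list passes (build candidates, filter 'enough', min/max) by one pass
-- keeping two scalar trackers (best fitting car, largest car); same return value everywhere.

-- ===== PORT A =====
def func4 (sp : List Int) (stat : List String) (n : Int) : Option Int :=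
  let candidates : List (Int × Int) :=
    (PySem.List.enumerate (sp.zip stat) 0).foldl
      (fun acc p => if p.2.2 == "0" then acc ++ [(p.1, p.2.1)] else acc) []
  if candidates = [] then none
  else
    let enough := candidates.filter (fun x => decide (n ≤ x.2))
    if enough ≠ [] then
      match PySem.List.min? enough (fun x => x.2) with
      | some m => some m.1
      | none => none          -- unreachable: enough ≠ []
    else
      match PySem.List.max? candidates (fun x => x.2) with
      | some m => some m.1
      | none => none          -- unreachable: candidates ≠ []

-- ===== PORT B =====
-- the 'best_fit' update of Source B's loop body
def bfStep (n : Int) (acc : Option (Int × Int)) (x : Int × Int) : Option (Int × Int) :=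
  match acc with
  | none => if n ≤ x.2 then some x else none
  | some m => if n ≤ x.2 ∧ x.2 < m.2 then some x else some m

-- the 'best_any' update of Source B's loop body
def baStep (acc : Option (Int × Int)) (x : Int × Int) : Option (Int × Int) :=
  match acc with
  | none => some x
  | some m => if m.2 < x.2 then some x else some m

-- one iteration of Source B's loop
def func4Step (n : Int) (s : Option (Int × Int) × Option (Int × Int))
    (p : Int × (Int × String)) : Option (Int × Int) × Option (Int × Int) :=
  if p.2.2 == "0" then (bfStep n s.1 (p.1, p.2.1), baStep s.2 (p.1, p.2.1)) else s

def func4_alt (sp : List Int) (stat : List String) (n : Int) : Option Int :=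
  let r := (PySem.List.enumerate (sp.zip stat) 0).foldl (func4Step n) (none, none)
  match r.1 with
  | some p => some p.1
  | none =>
    match r.2 with
    | some q => some q.1
    | none => none

-- ===== PRECONDITION & SPEC =====
def Spec_func4 (sp : List Int) (stat : List String) (n : Int) (out : Option Int) : Prop := out = func4_alt sp stat n
instance (sp : List Int) (stat : List String) (n : Int) (out : Option Int) : Decidable (Spec_func4 sp stat n out) := by unfold Spec_func4; infer_instance

-- ===== CLAIM (what is proved, stated in full; the proofs are below) =====
def Claim_equal_func4 : Prop := ∀ (sp : List Int) (stat : List String) (n : Int), Dom_func4 sp stat n → Spec_func4 sp stat n (func4 sp stat n)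

-- ===== LEMMAS AND PROOFS =====

-- Source B's fold over the enumerated zip is the pair of independent folds over the candidate list
theorem foldl_func4Step_split (n : Int) (L : List (Int × (Int × String)))
    (bf ba : Option (Int × Int)) :
    L.foldl (func4Step n) (bf, ba)
      = (((L.filter (fun p => p.2.2 == "0")).map (fun p => (p.1, p.2.1))).foldl (bfStep n) bf,
         ((L.filter (fun p => p.2.2 == "0")).map (fun p => (p.1, p.2.1))).foldl baStep ba) := by
  induction L generalizing bf ba with
  | nil => simp
  | cons p t ih =>
    by_cases h : p.2.2 == "0"
    · simp [func4Step, h, ih]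
    · simp [func4Step, h, ih]

-- the best_fit fold is the min?-fold over the fitting candidates
theorem foldl_bfStep_eq (n : Int) (c : List (Int × Int)) (acc : Option (Int × Int))
    (hacc : ∀ m, acc = some m → n ≤ m.2) :
    c.foldl (bfStep n) acc
      = (c.filter (fun x => decide (n ≤ x.2))).foldl
          (fun a x => match a with
            | none => some x
            | some m => if x.2 < m.2 then some x else some m) acc := by
  induction c generalizing acc with
  | nil => simp
  | cons x t ih =>
    simp only [List.foldl_cons, List.filter_cons]
    by_cases hx : n ≤ x.2
    · simp only [decide_eq_true hx, if_true, List.foldl_cons]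
      cases acc with
      | none =>
        rw [show bfStep n none x = some x from by simp [bfStep, hx]]
        exact ih _ (by intro m h; injection h with h; rw [← h]; exact hx)
      | some m =>
        by_cases hlt : x.2 < m.2
        · rw [show bfStep n (some m) x = some x from by simp [bfStep, hx, hlt]]
          rw [show (match some m with
              | none => some x
              | some m => if x.2 < m.2 then some x else some m) = some x from by
            simp [hlt]]
          exact ih _ (by intro m' h; injection h with h; rw [← h]; exact hx)
        · rw [show bfStep n (some m) x = some m from by simp [bfStep, hlt]]
          rw [show (match some m with
              | none => some x
              | some m => if x.2 < m.2 then some x else some m) = some m from by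
            simp [hlt]]
          exact ih _ hacc
    · have hstep : bfStep n acc x = acc := by
        cases acc with
        | none => simp [bfStep, hx]
        | some m => simp [bfStep, hx]
      simp only [hstep, decide_eq_false hx]
      exact ih _ hacc

-- the best_any fold is exactly PySem's first-extremal max?
theorem foldl_baStep_eq (c : List (Int × Int)) :
    c.foldl baStep none = PySem.List.max? c (fun x => x.2) := by
  unfold PySem.List.max?
  congr 1
  funext a x
  cases a <;> rfl

theorem foldl_bfStep_none_eq (n : Int) (c : List (Int × Int)) :
    c.foldl (bfStep n) none
      = PySem.List.min? (c.filter (fun x => decide (n ≤ x.2))) (fun x => x.2) := by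
  rw [foldl_bfStep_eq n c none (by intro m h; cases h)]
  unfold PySem.List.min?
  congr 1
  funext a x
  cases a <;> rfl

-- ===== VERDICT (by name: the statement is the Claim_ definition above) =====
theorem func4_spec : Claim_equal_func4 := by
  intro sp stat n _
  unfold Spec_func4 func4 func4_alt
  rw [PySem.List.foldl_append_if, foldl_func4Step_split]
  simp only [List.nil_append, foldl_baStep_eq, foldl_bfStep_none_eq]
  set c := ((PySem.List.enumerate (sp.zip stat) 0).filter (fun p => p.2.2 == "0")).map
      (fun p => (p.1, p.2.1)) with hc
  by_cases hnil : c = []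
  · simp [hnil, PySem.List.min?, PySem.List.max?]
  · rw [if_neg hnil]
    by_cases he : c.filter (fun x => decide (n ≤ x.2)) = []
    · rw [if_neg (fun hne => hne he)]
      have hmax : ∃ m, PySem.List.max? c (fun x => x.2) = some m := by
        cases h : PySem.List.max? c (fun x => x.2) with
        | none => exact absurd ((PySem.List.max?_eq_none_iff _ _).mp h) hnil
        | some m => exact ⟨m, rfl⟩
      obtain ⟨m, hm⟩ := hmax
      simp [he, PySem.List.min?, hm]
    · rw [if_pos he]
      have hmin : ∃ m, PySem.List.min? (c.filter (fun x => decide (n ≤ x.2))) (fun x => x.2) = some m := by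
        cases h : PySem.List.min? (c.filter (fun x => decide (n ≤ x.2))) (fun x => x.2) with
        | none => exact absurd ((PySem.List.min?_eq_none_iff _ _).mp h) he
        | some m => exact ⟨m, rfl⟩
      obtain ⟨m, hm⟩ := hmin
      simp [hm]
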